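-- pv_equiv track=rewrite | github.com/james0032/conve_pykeen | src/create_robokop_subgraph.py | check_remove
-- ===== SOURCE A (Python) =====
-- def check_remove(edge, typemap, remove):
--     subj = edge["subject"]
--     obj = edge["object"]
--     subj_types = typemap.get(subj, set())
--     obj_types = typemap.get(obj, set())
--     for acc in remove:
--         if acc[0] in subj_types and acc[1] in obj_types:
--             return True
--         if acc[1] in subj_types and acc[0] in obj_types:
--             return True
--     return False
-- ===== SOURCE B (Python) =====
-- def check_remove(edge, typemap, remove):
--     subj_types = typemap.get(edge["subject"], set())
--     obj_types = typemap.get(edge["object"], set())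
--     remove_set = {(acc[0], acc[1]) for acc in remove}
--     for s in subj_types:
--         for o in obj_types:
--             if (s, o) in remove_set or (o, s) in remove_set:
--                 return True
--     return False
-- ===== Notes on version B (the rewrite author's own statement) =====
-- stated objective: alternative
-- what changed: B prebuilds a hash set of remove-pairs once and drives the loop over the product of the two type sets, instead of rescanning the type sets for every remove pair.
import Mathlib
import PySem

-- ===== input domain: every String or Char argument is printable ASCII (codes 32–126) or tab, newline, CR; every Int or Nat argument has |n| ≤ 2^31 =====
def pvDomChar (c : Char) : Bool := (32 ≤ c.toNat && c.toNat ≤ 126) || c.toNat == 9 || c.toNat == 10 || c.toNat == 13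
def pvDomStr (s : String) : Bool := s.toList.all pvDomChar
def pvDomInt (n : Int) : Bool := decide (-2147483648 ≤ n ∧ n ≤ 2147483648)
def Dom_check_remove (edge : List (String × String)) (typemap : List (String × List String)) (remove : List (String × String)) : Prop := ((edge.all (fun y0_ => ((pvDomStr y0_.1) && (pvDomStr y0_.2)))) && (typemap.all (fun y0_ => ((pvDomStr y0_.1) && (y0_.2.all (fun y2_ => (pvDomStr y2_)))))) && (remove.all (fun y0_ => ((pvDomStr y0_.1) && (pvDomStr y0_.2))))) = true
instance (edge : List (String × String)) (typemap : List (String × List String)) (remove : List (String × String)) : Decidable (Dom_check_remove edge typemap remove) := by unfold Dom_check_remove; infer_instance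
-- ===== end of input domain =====

-- ===== PORT A =====
-- B changes the traversal: a prebuilt set of remove-pairs and a loop over the product of the type sets, instead of rescanning the type sets per remove pair (alternative decomposition, similar cost).
-- A's loop over remove, with its two early-return branches in order.
def checkRemoveLoop (subj_types obj_types : List String) : List (String × String) → Bool
  | [] => false
  | acc :: rest =>
    if subj_types.contains acc.1 && obj_types.contains acc.2 then true
    else if subj_types.contains acc.2 && obj_types.contains acc.1 then true
    else checkRemoveLoop subj_types obj_types rest

def check_remove (edge : List (String × String)) (typemap : List (String × List String)) (remove : List (String × String)) : Bool :=
  match (PySem.Dict.mk edge).get? "subject", (PySem.Dict.mk edge).get? "object" with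
  | some subj, some obj =>
    let subj_types := (PySem.Dict.mk typemap).getD subj []
    let obj_types := (PySem.Dict.mk typemap).getD obj []
    checkRemoveLoop subj_types obj_types remove
  | _, _ => false  -- KeyError in Python; excluded by Pre_

-- ===== PORT B =====
def check_remove_alt (edge : List (String × String)) (typemap : List (String × List String)) (remove : List (String × String)) : Bool :=
  match (PySem.Dict.mk edge).get? "subject" with
  | none => false  -- KeyError in Python; excluded by Pre_
  | some subj =>
    match (PySem.Dict.mk edge).get? "object" with
    | none => false  -- KeyError in Python; excluded by Pre_
    | some obj =>
      let subj_types := (PySem.Dict.mk typemap).getD subj []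
      let obj_types := (PySem.Dict.mk typemap).getD obj []
      let remove_set : PySem.Set (String × String) := PySem.Set.ofList remove
      subj_types.any (fun s => obj_types.any (fun o =>
        PySem.Set.contains remove_set (s, o) || PySem.Set.contains remove_set (o, s)))

-- ===== PRECONDITION & SPEC =====
-- A raises KeyError when edge lacks the "subject" or "object" key; excluded (B raises there too).
def Pre_check_remove (edge : List (String × String)) (typemap : List (String × List String)) (remove : List (String × String)) : Prop :=
  ((PySem.Dict.mk edge).get? "subject").isSome ∧ ((PySem.Dict.mk edge).get? "object").isSome
instance (edge : List (String × String)) (typemap : List (String × List String)) (remove : List (String × String)) : Decidable (Pre_check_remove edge typemap remove) := by unfold Pre_check_remove; infer_instance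

def pvWitness_check_remove : (List (String × String)) × (List (String × List String)) × (List (String × String)) :=
  ([("subject", "a"), ("object", "b")], [("a", ["T1"]), ("b", ["T2"])], [("T1", "T2")])

def Spec_check_remove (edge : List (String × String)) (typemap : List (String × List String)) (remove : List (String × String)) (out : Bool) : Prop := out = check_remove_alt edge typemap remove
instance (edge : List (String × String)) (typemap : List (String × List String)) (remove : List (String × String)) (out : Bool) : Decidable (Spec_check_remove edge typemap remove out) := by unfold Spec_check_remove; infer_instance

-- ===== CLAIM (what is proved, stated in full; the proofs are below) =====
def Claim_equal_check_remove : Prop := ∀ (edge : List (String × String)) (typemap : List (String × List String)) (remove : List (String × String)), Dom_check_remove edge typemap remove → Pre_check_remove edge typemap remove → Spec_check_remove edge typemap remove (check_remove edge typemap remove)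

-- ===== LEMMAS AND PROOFS =====
theorem checkRemoveLoop_eq_any (st ot : List String) (l : List (String × String)) :
    checkRemoveLoop st ot l
      = l.any (fun acc => (st.contains acc.1 && ot.contains acc.2) || (st.contains acc.2 && ot.contains acc.1)) := by
  induction l with
  | nil => rfl
  | cons a rest ih =>
    cases h1 : (st.contains a.1 && ot.contains a.2) <;>
      cases h2 : (st.contains a.2 && ot.contains a.1) <;>
        simp [checkRemoveLoop, h1, h2, ih, Bool.or_assoc]

theorem loop_eq_product (st ot : List String) (l : List (String × String)) :
    checkRemoveLoop st ot l
      = st.any (fun s => ot.any (fun o =>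
          PySem.Set.contains (PySem.Set.ofList l) (s, o) || PySem.Set.contains (PySem.Set.ofList l) (o, s))) := by
  rw [checkRemoveLoop_eq_any, Bool.eq_iff_iff]
  simp only [List.any_eq_true, Bool.or_eq_true, Bool.and_eq_true, List.contains_eq_mem,
    decide_eq_true_eq, PySem.Set.contains, PySem.Set.mem_ofList]
  constructor
  · rintro ⟨acc, hacc, ⟨h1, h2⟩ | ⟨h1, h2⟩⟩
    · exact ⟨acc.1, h1, acc.2, h2, Or.inl hacc⟩
    · exact ⟨acc.2, h1, acc.1, h2, Or.inr hacc⟩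
  · rintro ⟨s, hs, o, ho, h | h⟩
    · exact ⟨(s, o), h, Or.inl ⟨hs, ho⟩⟩
    · exact ⟨(o, s), h, Or.inr ⟨hs, ho⟩⟩

-- ===== VERDICT (by name: the statement is the Claim_ definition above) =====
theorem check_remove_spec : Claim_equal_check_remove := by
  intro edge typemap remove _ _
  unfold Spec_check_remove check_remove check_remove_alt
  cases hs : (PySem.Dict.mk edge).get? "subject" <;>
    cases ho : (PySem.Dict.mk edge).get? "object" <;>
      simp [loop_eq_product]
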